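-- pv_equiv track=rewrite | github.com/0x8b/advent.of.code.each | src/2024/02.py | is_difference_within_range
-- ===== SOURCE A (Python) =====
-- def is_increasing(seq, index_to_remove=None):
--     cloned_seq = [n for n in seq]
--
--     if index_to_remove is not None:
--         cloned_seq.pop(index_to_remove)
--
--     return cloned_seq == list(sorted(cloned_seq))
--
-- def is_decreasing(seq, index_to_remove=None):
--     cloned_seq = [n for n in seq]
--
--     if index_to_remove is not None:
--         cloned_seq.pop(index_to_remove)
--
--     return cloned_seq == list(reversed(sorted(cloned_seq)))
--
-- def is_difference_within_range(seq, minimum, maximum, index_to_remove=None):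
--     cloned_seq = [n for n in seq]
--
--     if index_to_remove is not None:
--         cloned_seq.pop(index_to_remove)
--
--     for i in range(len(cloned_seq) - 1):
--         if not (minimum <= abs(cloned_seq[i] - cloned_seq[i + 1]) <= maximum):
--             return False
--
--     return is_decreasing(cloned_seq) or is_increasing(cloned_seq)
-- ===== SOURCE B (Python) =====
-- def is_difference_within_range(seq, minimum, maximum, index_to_remove=None):
--     s = list(seq)
--
--     if index_to_remove is not None:
--         del s[index_to_remove]
--
--     increasing = decreasing = True
--     for a, b in zip(s, s[1:]):
--         d = b - a
--         if not (minimum <= abs(d) <= maximum):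
--             return False
--         if d < 0:
--             increasing = False
--         if d > 0:
--             decreasing = False
--
--     return increasing or decreasing
-- ===== Notes on version B (the rewrite author's own statement) =====
-- stated objective: alternative
-- what changed: One linear pass over adjacent pairs tracking non-decreasing/non-increasing flags replaces A's two extra sorting passes (sorted + reversed-sorted comparison) after the difference loop.
import Mathlib
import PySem

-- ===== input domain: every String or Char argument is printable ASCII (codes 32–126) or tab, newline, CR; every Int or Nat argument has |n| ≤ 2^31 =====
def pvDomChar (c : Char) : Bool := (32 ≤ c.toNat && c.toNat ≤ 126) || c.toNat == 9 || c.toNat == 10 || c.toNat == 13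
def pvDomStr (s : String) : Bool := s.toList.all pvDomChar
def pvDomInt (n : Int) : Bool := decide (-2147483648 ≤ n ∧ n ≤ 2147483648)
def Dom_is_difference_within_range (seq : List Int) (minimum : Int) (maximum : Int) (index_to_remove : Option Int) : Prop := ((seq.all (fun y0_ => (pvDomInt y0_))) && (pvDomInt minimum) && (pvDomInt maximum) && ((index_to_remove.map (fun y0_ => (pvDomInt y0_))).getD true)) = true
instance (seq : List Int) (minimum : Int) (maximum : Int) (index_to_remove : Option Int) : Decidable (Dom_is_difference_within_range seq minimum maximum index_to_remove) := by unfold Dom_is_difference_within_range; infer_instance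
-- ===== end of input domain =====

-- B replaces A's two sorting passes (sorted / reversed-sorted comparison) by monotonicity flags
-- maintained in the single pass over adjacent differences (objective: alternative algorithm).


-- ===== PORT A =====
-- the clone + optional pop/del both Pythons perform first ('[n for n in seq]' then '.pop(i)' / 'del s[i]');
-- none = the pop raised IndexError (excluded by Pre_)
def pvClone (seq : List Int) (index_to_remove : Option Int) : Option (List Int) :=
  match index_to_remove with
  | none => some seq
  | some i => (PySem.List.pop? seq i).map (fun r => r.2)

def pyIsIncreasing (seq : List Int) (index_to_remove : Option Int) : Bool :=
  match pvClone seq index_to_remove with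
  | none => false   -- pop raised (never reached: A only calls this with index_to_remove = none)
  | some c => decide (c = PySem.List.sorted c (fun x => x))

def pyIsDecreasing (seq : List Int) (index_to_remove : Option Int) : Bool :=
  match pvClone seq index_to_remove with
  | none => false   -- pop raised (never reached: A only calls this with index_to_remove = none)
  | some c => decide (c = (PySem.List.sorted c (fun x => x)).reverse)

-- 'for i in range(len(cloned_seq) - 1): if not (minimum <= abs(...) <= maximum): return False'
def pvACheck (c : List Int) (minimum : Int) (maximum : Int) : List Int → Bool
  | [] => pyIsDecreasing c none || pyIsIncreasing c none
  | i :: rest =>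
    if !(decide (minimum ≤ |PySem.List.pyGetD c i 0 - PySem.List.pyGetD c (i + 1) 0|) &&
         decide (|PySem.List.pyGetD c i 0 - PySem.List.pyGetD c (i + 1) 0| ≤ maximum)) then false
    else pvACheck c minimum maximum rest

def is_difference_within_range (seq : List Int) (minimum : Int) (maximum : Int) (index_to_remove : Option Int) : Bool :=
  match pvClone seq index_to_remove with
  | none => false   -- pop raised IndexError (excluded by Pre_)
  | some c => pvACheck c minimum maximum (PySem.List.pyRange 0 ((c.length : Int) - 1) 1)

-- ===== PORT B =====
-- single pass over zip(s, s[1:]) maintaining the two monotonicity flags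
def pvBScan (minimum : Int) (maximum : Int) : List (Int × Int) → Bool → Bool → Bool
  | [], inc, dec => inc || dec
  | p :: rest, inc, dec =>
    let d := p.2 - p.1
    if !(decide (minimum ≤ |d|) && decide (|d| ≤ maximum)) then false
    else pvBScan minimum maximum rest (inc && !(decide (d < 0))) (dec && !(decide (d > 0)))

def is_difference_within_range_alt (seq : List Int) (minimum : Int) (maximum : Int) (index_to_remove : Option Int) : Bool :=
  match pvClone seq index_to_remove with
  | none => false   -- del raised IndexError (excluded by Pre_)
  | some c => pvBScan minimum maximum (c.zip (PySem.List.slice c (some 1) none)) true true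

-- ===== PRECONDITION & SPEC =====
-- Pre_ excludes exactly the inputs where the pop/del raises IndexError: an index_to_remove outside [-len(seq), len(seq))
def Pre_is_difference_within_range (seq : List Int) (_minimum : Int) (_maximum : Int) (index_to_remove : Option Int) : Prop :=
  (index_to_remove.all (fun i => decide (PySem.Raise.InRange seq.length i))) = true
instance (seq : List Int) (minimum : Int) (maximum : Int) (index_to_remove : Option Int) : Decidable (Pre_is_difference_within_range seq minimum maximum index_to_remove) := by unfold Pre_is_difference_within_range; infer_instance

def pvWitness_is_difference_within_range : List Int × Int × Int × Option Int := ([1, 3, 5, 4], 1, 3, some 3)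

def Spec_is_difference_within_range (seq : List Int) (minimum : Int) (maximum : Int) (index_to_remove : Option Int) (out : Bool) : Prop := out = is_difference_within_range_alt seq minimum maximum index_to_remove
instance (seq : List Int) (minimum : Int) (maximum : Int) (index_to_remove : Option Int) (out : Bool) : Decidable (Spec_is_difference_within_range seq minimum maximum index_to_remove out) := by unfold Spec_is_difference_within_range; infer_instance

-- ===== CLAIM (what is proved, stated in full; the proofs are below) =====
def Claim_equal_is_difference_within_range : Prop := ∀ (seq : List Int) (minimum : Int) (maximum : Int) (index_to_remove : Option Int), Dom_is_difference_within_range seq minimum maximum index_to_remove → Pre_is_difference_within_range seq minimum maximum index_to_remove → Spec_is_difference_within_range seq minimum maximum index_to_remove (is_difference_within_range seq minimum maximum index_to_remove)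

-- ===== LEMMAS AND PROOFS =====

-- the index loop of A reads exactly the adjacent pairs of c
lemma pvPairs_eq (c : List Int) :
    (PySem.List.pyRange 0 ((c.length : Int) - 1) 1).map
      (fun i => (PySem.List.pyGetD c i 0, PySem.List.pyGetD c (i + 1) 0)) = c.zip c.tail := by
  apply List.ext_getElem
  · simp only [List.length_map, PySem.List.length_pyRange_one, List.length_zip, List.length_tail]
    omega
  · intro k h1 h2
    have hk1 : k < c.length - 1 := by
      simpa [PySem.List.length_pyRange_one] using h1
    have hk : k + 1 < c.length := by omega
    have hk0 : k < c.length := by omega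
    simp only [List.getElem_map, PySem.List.getElem_pyRange_one, List.getElem_zip, zero_add]
    have h3 : ((k : Int) + 1) = ((k + 1 : Nat) : Int) := by push_cast; ring
    rw [h3, PySem.List.pyGetD_natCast, PySem.List.pyGetD_natCast]
    simp [hk0, hk, List.getElem_tail]

lemma pvACheck_eq (c : List Int) (mn mx : Int) : ∀ js : List Int,
    pvACheck c mn mx js =
      ((js.all (fun i => decide (mn ≤ |PySem.List.pyGetD c i 0 - PySem.List.pyGetD c (i + 1) 0|) &&
                         decide (|PySem.List.pyGetD c i 0 - PySem.List.pyGetD c (i + 1) 0| ≤ mx))) &&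
       (pyIsDecreasing c none || pyIsIncreasing c none))
  | [] => by simp [pvACheck]
  | i :: rest => by
    rw [pvACheck, pvACheck_eq c mn mx rest]
    by_cases h : (decide (mn ≤ |PySem.List.pyGetD c i 0 - PySem.List.pyGetD c (i + 1) 0|) &&
                  decide (|PySem.List.pyGetD c i 0 - PySem.List.pyGetD c (i + 1) 0| ≤ mx)) = true
    · simp [h]
    · simp [List.all_cons, Bool.eq_false_iff.mpr h]

lemma pvBScan_eq (mn mx : Int) : ∀ (ps : List (Int × Int)) (inc dec : Bool),
    pvBScan mn mx ps inc dec =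
      ((ps.all (fun p => decide (mn ≤ |p.2 - p.1|) && decide (|p.2 - p.1| ≤ mx))) &&
       ((inc && ps.all (fun p => !(decide (p.2 - p.1 < 0)))) ||
        (dec && ps.all (fun p => !(decide (p.2 - p.1 > 0))))))
  | [], inc, dec => by simp [pvBScan]
  | p :: rest, inc, dec => by
    rw [pvBScan]
    by_cases h : (decide (mn ≤ |p.2 - p.1|) && decide (|p.2 - p.1| ≤ mx)) = true
    · simp only [h, Bool.not_true, Bool.false_eq_true, if_false, pvBScan_eq mn mx rest,
        List.all_cons, Bool.true_and, Bool.and_assoc]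
    · simp [List.all_cons, Bool.eq_false_iff.mpr h]

-- zip-with-tail "all" is the chain condition
lemma pvAllZipTail (f : Int → Int → Bool) : ∀ c : List Int,
    ((c.zip c.tail).all (fun p => f p.1 p.2)) = true ↔ c.IsChain (fun a b => f a b = true)
  | [] => by simp
  | [x] => by simp
  | x :: y :: t => by
    have ih := pvAllZipTail f (y :: t)
    simp only [List.tail_cons, List.zip_cons_cons, List.all_cons, Bool.and_eq_true,
      List.isChain_cons_cons]
    rw [← ih]
    simp

-- 'cloned_seq == list(sorted(cloned_seq))' is exactly 'no adjacent drop'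
lemma pvInc_eq (c : List Int) :
    decide (c = PySem.List.sorted c (fun x => x)) =
      (c.zip c.tail).all (fun p => !(decide (p.2 - p.1 < 0))) := by
  rw [Bool.eq_iff_iff, decide_eq_true_iff,
    pvAllZipTail (fun a b => !(decide (b - a < 0))) c]
  have hrel : (fun a b : Int => (!(decide (b - a < 0))) = true) = (fun a b : Int => a ≤ b) := by
    funext a b
    exact propext (by simp)
  rw [hrel, List.isChain_iff_pairwise]
  constructor
  · intro h
    have := PySem.List.sorted_pairwise c (fun x => x)
    rw [← h] at this
    exact this
  · intro h
    exact (PySem.List.sorted_eq_self_of_pairwise c (fun x => x) h).symm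

-- 'cloned_seq == list(reversed(sorted(cloned_seq)))' is exactly 'no adjacent rise'
lemma pvDec_eq (c : List Int) :
    decide (c = (PySem.List.sorted c (fun x => x)).reverse) =
      (c.zip c.tail).all (fun p => !(decide (p.2 - p.1 > 0))) := by
  rw [Bool.eq_iff_iff, decide_eq_true_iff,
    pvAllZipTail (fun a b => !(decide (b - a > 0))) c]
  have hrel : (fun a b : Int => (!(decide (b - a > 0))) = true) = (fun a b : Int => b ≤ a) := by
    funext a b
    exact propext (by simp)
  rw [hrel]
  constructor
  · intro h
    have h2 : c.reverse = PySem.List.sorted c (fun x => x) := by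
      conv_lhs => rw [h]
      exact List.reverse_reverse _
    have hp := PySem.List.sorted_pairwise c (fun x => x)
    rw [← h2, List.pairwise_reverse] at hp
    rw [List.isChain_iff_pairwise]
    exact hp
  · intro h
    rw [List.isChain_iff_pairwise] at h
    have hp : c.reverse.Pairwise (fun a b : Int => a ≤ b) := by
      rw [List.pairwise_reverse]
      exact h
    have := PySem.List.sorted_id_eq_of_perm_of_pairwise c c.reverse (c.reverse_perm) hp
    rw [this, List.reverse_reverse]

-- the range condition read through indices equals the range condition on the adjacent pairs
lemma pvGood_eq (c : List Int) (mn mx : Int) :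
    (PySem.List.pyRange 0 ((c.length : Int) - 1) 1).all
        (fun i => decide (mn ≤ |PySem.List.pyGetD c i 0 - PySem.List.pyGetD c (i + 1) 0|) &&
                  decide (|PySem.List.pyGetD c i 0 - PySem.List.pyGetD c (i + 1) 0| ≤ mx)) =
      (c.zip c.tail).all (fun p => decide (mn ≤ |p.2 - p.1|) && decide (|p.2 - p.1| ≤ mx)) := by
  rw [← pvPairs_eq c, List.all_map]
  congr 1
  funext i
  simp only [Function.comp_apply]
  rw [abs_sub_comm (PySem.List.pyGetD c i 0)]

lemma pvCore (c : List Int) (mn mx : Int) :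
    pvACheck c mn mx (PySem.List.pyRange 0 ((c.length : Int) - 1) 1) =
      pvBScan mn mx (c.zip (PySem.List.slice c (some 1) none)) true true := by
  rw [PySem.List.slice_from_one, pvACheck_eq, pvBScan_eq, pvGood_eq]
  congr 1
  simp only [pyIsDecreasing, pyIsIncreasing, pvClone]
  rw [pvDec_eq, pvInc_eq, Bool.true_and, Bool.true_and, Bool.or_comm]

-- under Pre_ the pop/del succeeds
lemma pvPopSome (xs : List Int) (i : Int) (h : PySem.Raise.InRange xs.length i) :
    ∃ r, PySem.List.pop? xs i = some r := by
  obtain ⟨h1, h2⟩ := h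
  unfold PySem.List.pop? PySem.List.pyIdx?
  by_cases h0 : 0 ≤ i
  · have hlt : i.toNat < xs.length := by omega
    simp [h0, h2, Option.bind]
  · have hk : xs.length - (-i).toNat < xs.length := by omega
    simp only [h0, if_false, h1, if_pos, Option.bind]
    simp [List.getElem?_eq_getElem hk]

-- ===== VERDICT (by name: the statement is the Claim_ definition above) =====
theorem is_difference_within_range_spec : Claim_equal_is_difference_within_range := by
  intro seq mn mx idx _ hpre
  unfold Spec_is_difference_within_range
  unfold is_difference_within_range is_difference_within_range_alt
  have hsome : ∃ c, pvClone seq idx = some c := by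
    cases idx with
    | none => exact ⟨seq, rfl⟩
    | some i =>
      have hin : PySem.Raise.InRange seq.length i := by
        simpa [Pre_is_difference_within_range] using hpre
      obtain ⟨r, hr⟩ := pvPopSome seq i hin
      exact ⟨r.2, by simp [pvClone, hr]⟩
  obtain ⟨c, hc⟩ := hsome
  rw [hc]
  exact pvCore c mn mx
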